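/- GENERATED by tools/from_farm_form.py from prooffarm-gif/accepted/GifFreeExtensions.2/Proof.lean (a worked proof of the farm's unit `GifFreeExtensions.2`,
   accepted by the verdict) — do not edit. -/
import Gif.Spec.Units.GifFreeExtensions_2
import Gif.Spec.AllSegs
import Gif.Spec.Proved.GifFreeExtensions_2_Lemmas

/-!
  `GifFreeExtensions.2` (0x107dc3 … 0x107e32, entered at the loop head 0x107dd9, 29 instructions; gifalloc.c:276-282): from the
  loop head of `GifFreeExtensions`, one round (`k < length`: `free(ep->Bytes)`, `ep++`, the head again) or the exit
  (`k = length`: `free(*blocks)`, `*blocks = NULL`, `*count = 0`, the epilogue). The two arms are walked in Lemmas.lean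
  (`fx2_round`, `fx2_exit`), each with `free`'s contract at the heap after `k` rounds and the size of the object it frees.
-/

open X86 X86.User Asan ProgX.Base ProgX.Base.Spec Gif.Spec

/-- Segment 2 of `GifFreeExtensions` takes `Head k` to `Head (k + 1)` or to `Returned`. -/
theorem Gif.Spec.Proved.GifFreeExtensions_2_ok : Gif.Spec.GifFreeExtensions_2.Statement := by
  intro Lay hLay μ hμ u₀ hcode h_free h_load8 h_load4 h_store8 h_store4 H rest frames ex ob on x k e ret v hat
  by_cases hk : k < x.blocks.length
  · -- 0x107dfd `jb` taken (gifalloc.c:276 `ep < *blocks + *count`): one round, `free` of the bytes of block `k`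
    have hfree := h_free (GifFreeExtensions.heapAt H x k) rest frames (x.blocks[k]).len
    have hround := Gif.Spec.GifFreeExtensions_2.fx2_round Lay hLay μ hμ u₀ hcode h_load8 h_load4 H rest frames ex ob on x k
      e ret v hk hfree hat
    exact ReachVia.mono hround (fun w hw => Or.inl hw)
  · -- 0x107dfd `jb` not taken (`k = length`): the exit, `free` of the array
    have hle := hat.le
    have hkl : k = x.blocks.length := by omega
    have hfree := h_free (GifFreeExtensions.heapAt H x k) rest frames (24 * x.cap)
    have hexit := Gif.Spec.GifFreeExtensions_2.fx2_exit Lay hLay μ hμ u₀ hcode h_load8 h_load4 h_store8 h_store4 H rest frames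
      ex ob on x k e ret v hkl hfree hat
    exact ReachVia.mono hexit (fun w hw => Or.inr hw)
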